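-- pv_equiv track=rewrite | github.com/SaiSridhar783/Machine-Learning | preprocessing_regularization/algorithm.py | convert_to_numerical_labels
-- ===== SOURCE A (Python) =====
-- def convert_to_numerical_labels(X):
--     dic = {}
--     k = sorted(list(set(X)))
--     for i in range(len(k)):
--         dic[k[i]] = i
--
--     for i in range(len(X)):
--         X[i] = dic.get(X[i])
--
--     return X
-- ===== SOURCE B (Python) =====
-- def convert_to_numerical_labels(X):
--     # Different strategy: no rank dictionary at all -- each element's label is
--     # found by binary-searching the sorted distinct values for the leftmost
--     # position not below it. Mutates X in place and returns it, like the original.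
--     k = sorted(set(X))
--     for i in range(len(X)):
--         x = X[i]
--         lo, hi = 0, len(k)
--         while lo < hi:
--             mid = (lo + hi) // 2
--             if k[mid] < x:
--                 lo = mid + 1
--             else:
--                 hi = mid
--         X[i] = lo
--     return X
-- ===== Notes on version B (the rewrite author's own statement) =====
-- stated objective: alternative
-- what changed: The rank dictionary built from the sorted distinct values and its per-element lookup are removed: B labels each element by a hand-rolled leftmost binary search over the sorted distinct values.
import Mathlib
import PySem

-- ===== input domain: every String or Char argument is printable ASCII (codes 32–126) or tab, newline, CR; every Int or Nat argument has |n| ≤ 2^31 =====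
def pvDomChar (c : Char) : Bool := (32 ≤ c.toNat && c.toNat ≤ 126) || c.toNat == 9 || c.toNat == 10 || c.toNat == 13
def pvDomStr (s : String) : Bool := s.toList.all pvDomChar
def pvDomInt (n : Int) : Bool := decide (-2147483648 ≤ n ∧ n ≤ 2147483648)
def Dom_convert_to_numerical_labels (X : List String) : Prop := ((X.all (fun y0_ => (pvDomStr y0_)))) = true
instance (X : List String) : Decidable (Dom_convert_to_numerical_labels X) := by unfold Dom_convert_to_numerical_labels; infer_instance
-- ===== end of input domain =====

-- B replaces A's rank dictionary (built from the sorted distinct values and looked up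
-- per element) by a leftmost binary search over the sorted distinct values; alternative
-- algorithm, return value proved equal. (Both Pythons mutate X in place; the equivalence
-- here is about the return value, which is the same mutated list in both.)


-- ===== PORT A =====
-- k = sorted(list(set(X))); for i in range(len(k)): dic[k[i]] = i;
-- for i in range(len(X)): X[i] = dic.get(X[i]); return X.
-- dic.get(X[i]) always hits (every X[i] is a key), so the Option is unwrapped with
-- a default that is never used; the in-place writes amount to a map over X.
def convert_to_numerical_labels (X : List String) : List Int :=
  let k := PySem.List.sorted (PySem.Set.ofList X) (fun x => x) false
  let dic := (PySem.List.pyRange 0 (PySem.List.len k) 1).foldl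
      (fun d i => d.insert (PySem.List.pyGetD k i "") i) PySem.Dict.empty
  X.map (fun x => (PySem.Dict.get? dic x).getD 0)

-- ===== PORT B =====
-- the 'while lo < hi' loop of Source B; lo and hi stay natural throughout, so it is ported
-- on Nat ('(lo + hi) / 2' on Nat is exactly Python's '(lo + hi) // 2' here), and
-- k[mid] is in range (mid < hi <= len(k)), so pyGetD's default is never used
def bsearchRank (k : List String) (x : String) (lo hi : Nat) : Nat :=
  if lo < hi then
    if PySem.List.pyGetD k (((lo + hi) / 2 : Nat) : Int) "" < x then
      bsearchRank k x ((lo + hi) / 2 + 1) hi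
    else
      bsearchRank k x lo ((lo + hi) / 2)
  else lo
termination_by hi - lo
decreasing_by all_goals omega

-- k = sorted(set(X)); X[i] = leftmost position in k not below X[i]; return X
def convert_to_numerical_labels_alt (X : List String) : List Int :=
  let k := PySem.List.sorted (PySem.Set.ofList X) (fun x => x) false
  X.map (fun x => (bsearchRank k x 0 k.length : Int))

-- ===== PRECONDITION & SPEC =====
def Spec_convert_to_numerical_labels (X : List String) (out : List Int) : Prop := out = convert_to_numerical_labels_alt X
instance (X : List String) (out : List Int) : Decidable (Spec_convert_to_numerical_labels X out) := by unfold Spec_convert_to_numerical_labels; infer_instance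

-- ===== CLAIM (what is proved, stated in full; the proofs are below) =====
def Claim_equal_convert_to_numerical_labels : Prop := ∀ (X : List String), Dom_convert_to_numerical_labels X → Spec_convert_to_numerical_labels X (convert_to_numerical_labels X)

-- ===== LEMMAS AND PROOFS =====

-- A's index loop over k is the fold of the rank-inserting step over enumerate k 0.
theorem buildDict_eq (k : List String) :
    (PySem.List.pyRange 0 (PySem.List.len k) 1).foldl
      (fun d i => d.insert (PySem.List.pyGetD k i "") i) PySem.Dict.empty
    = (PySem.List.enumerate k 0).foldl (fun d p => d.insert p.2 p.1) PySem.Dict.empty := by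
  rw [PySem.List.enumerate_eq_map_pyRange k "", List.foldl_map]

-- folding inserts of keys from t does not touch a key outside t
theorem rankFold_getD_not_mem (t : List String) (s : Int) (d : PySem.Dict String Int)
    (x : String) (hx : x ∉ t) :
    ((PySem.List.enumerate t s).foldl (fun d p => d.insert p.2 p.1) d).getD x 0 = d.getD x 0 := by
  induction t generalizing s d with
  | nil => simp [PySem.List.enumerate_nil]
  | cons a t ih =>
    rw [PySem.List.enumerate_cons, List.foldl_cons,
        ih (s+1) _ (fun h => hx (List.mem_cons_of_mem _ h)),
        PySem.Dict.getD_insert_of_ne]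
    exact fun h => hx (h ▸ List.mem_cons_self)

-- on a strictly increasing key list, the rank stored for x is s + #{u ∈ t | u < x}
theorem rankFold_getD_mem (t : List String) (s : Int) (d : PySem.Dict String Int)
    (x : String) (hx : x ∈ t) (hp : t.Pairwise (· < ·)) :
    ((PySem.List.enumerate t s).foldl (fun d p => d.insert p.2 p.1) d).getD x 0
      = s + (t.countP (fun u => decide (u < x)) : Int) := by
  induction t generalizing s d with
  | nil => exact absurd hx (List.not_mem_nil)
  | cons a t ih =>
    rw [PySem.List.enumerate_cons, List.foldl_cons]
    rcases List.pairwise_cons.mp hp with ⟨ha, hp'⟩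
    rcases List.mem_cons.mp hx with rfl | hxt
    · have hnx : x ∉ t := fun h => lt_irrefl x (ha x h)
      rw [rankFold_getD_not_mem t (s+1) _ x hnx, PySem.Dict.getD_insert_self,
          List.countP_cons]
      have h0 : t.countP (fun u => decide (u < x)) = 0 :=
        List.countP_eq_zero.mpr (fun u hu => by simp only [decide_eq_true_eq]; exact asymm (ha u hu))
      have hxx : (decide (x < x)) = false := decide_eq_false (lt_irrefl x)
      rw [h0, hxx]
      simp
    · rw [ih (s+1) _ hxt hp', List.countP_cons,
          decide_eq_true (ha x hxt)]
      simp only [if_true]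
      push_cast
      ring

-- if p holds exactly at the positions before lo, then countP p = lo
theorem countP_eq_of_split (k : List String) (p : String → Bool) (lo : Nat) (hlo : lo ≤ k.length)
    (hb : ∀ j (hj : j < k.length), j < lo → p k[j])
    (ha : ∀ j (hj : j < k.length), lo ≤ j → ¬ p k[j]) :
    k.countP p = lo := by
  have hsplit := List.take_append_drop lo k
  calc k.countP p = ((k.take lo) ++ (k.drop lo)).countP p := by rw [hsplit]
    _ = (k.take lo).countP p + (k.drop lo).countP p := List.countP_append ..
    _ = lo := by
        have h1 : (k.take lo).countP p = lo := by
          rw [List.countP_eq_length.mpr, List.length_take_of_le hlo]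
          intro a hmem
          rcases List.mem_iff_getElem.mp hmem with ⟨j, hj, rfl⟩
          rw [List.getElem_take]
          exact hb j (by simp at hj; omega) (by simp at hj; omega)
        have h2 : (k.drop lo).countP p = 0 := by
          apply List.countP_eq_zero.mpr
          intro a hmem
          rcases List.mem_iff_getElem.mp hmem with ⟨j, hj, rfl⟩
          rw [List.getElem_drop]
          exact ha (lo + j) (by simp at hj; omega) (by omega)
        omega

-- the binary search returns the number of values below x, given the loop invariant
theorem bsearchRank_eq (k : List String) (x : String) (hp : k.Pairwise (· < ·))
    (lo hi : Nat) (h1 : lo ≤ hi) (h2 : hi ≤ k.length)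
    (hb : ∀ j (hj : j < k.length), j < lo → k[j] < x)
    (ha : ∀ j (hj : j < k.length), hi ≤ j → ¬ k[j] < x) :
    bsearchRank k x lo hi = k.countP (fun u => decide (u < x)) := by
  have hpg := List.pairwise_iff_getElem.mp hp
  rw [bsearchRank]
  by_cases h : lo < hi
  · simp only [if_pos h]
    have hmid : (lo + hi) / 2 < k.length := by omega
    rw [PySem.List.pyGetD_natCast, List.getD_eq_getElem _ _ hmid]
    split_ifs with hcmp
    · apply bsearchRank_eq k x hp _ hi (by omega) h2 _ ha
      intro j hj hjlt
      rcases Nat.lt_or_ge j ((lo + hi) / 2) with hlt | hge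
      · exact lt_trans (hpg j _ hj hmid hlt) hcmp
      · have : j = (lo + hi) / 2 := by omega
        exact this ▸ hcmp
    · apply bsearchRank_eq k x hp lo _ (by omega) (by omega) hb
      intro j hj hjge hcon
      rcases Nat.lt_or_ge ((lo + hi) / 2) j with hlt | hge
      · exact hcmp (lt_trans (hpg _ j hmid hj hlt) hcon)
      · have : j = (lo + hi) / 2 := by omega
        exact hcmp (this ▸ hcon)
  · simp only [if_neg h]
    have hle : lo = hi := by omega
    subst hle
    exact (countP_eq_of_split k _ lo h2
      (fun j hj hjlt => decide_eq_true (hb j hj hjlt))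
      (fun j hj hjge hcon => ha j hj hjge (of_decide_eq_true hcon))).symm
termination_by hi - lo
decreasing_by all_goals omega

-- ===== VERDICT (by name: the statement is the Claim_ definition above) =====
theorem convert_to_numerical_labels_spec : Claim_equal_convert_to_numerical_labels := by
  intro X _
  unfold Spec_convert_to_numerical_labels convert_to_numerical_labels convert_to_numerical_labels_alt
  apply List.map_congr_left
  intro x hx
  have hmem : x ∈ PySem.List.sorted (PySem.Set.ofList X) (fun x => x) false := by
    rw [PySem.List.mem_sorted, PySem.Set.mem_ofList]; exact hx
  have hpair := PySem.List.sorted_ofList_pairwise_lt X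
  rw [buildDict_eq, ← PySem.Dict.getD_eq_get?_getD,
      rankFold_getD_mem _ 0 _ x hmem hpair,
      bsearchRank_eq _ x hpair 0 _ (Nat.zero_le _) le_rfl
        (fun j hj hjlt => absurd hjlt (by omega))
        (fun j hj hjge => absurd hj (by omega))]
  simp
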